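-- pv_equiv track=rewrite | github.com/Jay-Youngjae/algorithm | 프로그래머스/2/250136. ［PCCP 기출문제］ 2번 ／ 석유 시추/［PCCP 기출문제］ 2번 ／ 석유 시추.py | solution
-- ===== SOURCE A (Python) =====
-- def solution(land): # 1이면 석유 있음 0은 그냥 땅
--     def oil_cnt(y, x):
--         dy = [-1, 0, 1, 0] # 북 동 남 서
--         dx = [0, 1, 0, -1]
--         visited[y][x] = True
--         cols.add(x)
--         cnt = 1
--         for i in range(4):
--             ny = y + dy[i]
--             nx = x + dx[i]
--             if 0<=nx<m and 0<=ny<n and land[ny][nx] == 1 and not visited[ny][nx]: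
--                 cnt += oil_cnt(ny, nx)
--
--         return cnt
--
--
--     n = len(land)
--     m = len(land[0])
--     ans = [0] * m
--     visited = [[False] * m for _ in range(n)]
--     for i in range(n):
--         for j in range(m):
--             if land[i][j] == 1 and not visited[i][j]:
--                 cols = set()
--                 size = oil_cnt(i, j)
--                 for c in cols:
--                     ans[c] += size
--
--     return max(ans)
-- ===== SOURCE B (Python) =====
-- def solution(land):
--     n, m = len(land), len(land[0])
--     visited = [[False] * m for _ in range(n)]
--     ans = [0] * m
--     for i in range(n):
--         for j in range(m):
--             if land[i][j] == 1 and not visited[i][j]: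
--                 cols = set()
--                 size = 0
--                 stack = [(i, j, 0)]
--                 while stack:
--                     y, x, d = stack.pop()
--                     if d == 0:
--                         visited[y][x] = True
--                         cols.add(x)
--                         size += 1
--                     if d < 4:
--                         stack.append((y, x, d + 1))
--                         ny = y + (-1, 0, 1, 0)[d]
--                         nx = x + (0, 1, 0, -1)[d]
--                         if 0 <= nx < m and 0 <= ny < n and land[ny][nx] == 1 and not visited[ny][nx]:
--                             stack.append((ny, nx, 0))
--                 for c in cols:
--                     ans[c] += size
--     return max(ans)
-- ===== Notes on version B (the rewrite author's own statement) =====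
-- stated objective: alternative
-- what changed: The recursive flood-fill helper (oil_cnt, a nested closure recursing on the four neighbours) is replaced by an iterative depth-first search driven by an explicit stack of (cell, next-direction) frames inside a single while loop, with the component size kept in an accumulator instead of summed over recursive return values; no recursion remains.
-- outside the precondition, e.g. on solution([]): A raises IndexError, B raises IndexError; on solution([[]]): A raises ValueError, B raises ValueError; on solution([[1, 1], [1]]): A raises IndexError, B raises IndexError
import Mathlib
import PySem

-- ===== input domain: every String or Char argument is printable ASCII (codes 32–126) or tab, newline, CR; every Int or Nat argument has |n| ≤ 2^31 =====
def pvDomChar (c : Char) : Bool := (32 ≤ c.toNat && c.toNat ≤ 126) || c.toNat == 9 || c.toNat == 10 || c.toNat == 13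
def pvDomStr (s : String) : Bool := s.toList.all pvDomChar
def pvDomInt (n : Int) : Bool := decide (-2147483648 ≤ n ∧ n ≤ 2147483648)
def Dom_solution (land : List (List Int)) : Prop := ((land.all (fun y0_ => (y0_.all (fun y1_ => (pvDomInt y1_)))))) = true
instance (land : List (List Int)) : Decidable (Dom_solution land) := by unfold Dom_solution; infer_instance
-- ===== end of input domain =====

-- B replaces A's recursive flood fill by an explicit-stack iterative DFS (objective: alternative, same cost).

-- ===== PORT A =====
-- shared small helpers for the guarded 2-D accesses (exact under the 0 ≤ idx < len guards
-- that both Pythons test immediately before each access; .getD/.set are the totality guards)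
def getL (land : List (List Int)) (y x : Int) : Int :=
  ((land.getD y.toNat []).getD x.toNat 0)
def getV (v : List (List Bool)) (y x : Int) : Bool :=
  ((v.getD y.toNat []).getD x.toNat false)
def setV (v : List (List Bool)) (y x : Int) (b : Bool) : List (List Bool) :=
  v.set y.toNat ((v.getD y.toNat []).set x.toNat b)
-- dy/dx direction tables (A: lists dy/dx; B: the inline tuples (-1,0,1,0)/(0,1,0,-1))
def dirY (i : Int) : Int := ([-1, 0, 1, 0] : List Int).getD i.toNat 0
def dirX (i : Int) : Int := ([0, 1, 0, -1] : List Int).getD i.toNat 0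

-- A's nested recursive oil_cnt; the Nat fuel is only a totality guard (never exhausted:
-- each call permanently marks one unvisited cell).  Returns (visited, cols, cnt).
mutual
def oilCnt : Nat → List (List Int) → Int → Int → List (List Bool) → PySem.Set Int →
    Int → Int → List (List Bool) × PySem.Set Int × Int
  | 0, _, _, _, v, cols, _, _ => (v, cols, 0)
  | fA + 1, land, n, m, v, cols, y, x =>
    oilLoop fA land n m y x (PySem.List.pyRange 0 4 1)
      (setV v y x true) (PySem.Set.add cols x) 1
  termination_by fA _ _ _ _ _ _ _ => (fA, 0)
def oilLoop : Nat → List (List Int) → Int → Int → Int → Int → List Int →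
    List (List Bool) → PySem.Set Int → Int → List (List Bool) × PySem.Set Int × Int
  | _, _, _, _, _, _, [], v, cols, cnt => (v, cols, cnt)
  | fA, land, n, m, y, x, i :: restDirs, v, cols, cnt =>
    if 0 ≤ x + dirX i ∧ x + dirX i < m ∧ 0 ≤ y + dirY i ∧ y + dirY i < n ∧
        getL land (y + dirY i) (x + dirX i) = 1 ∧ getV v (y + dirY i) (x + dirX i) = false then
      let r := oilCnt fA land n m v cols (y + dirY i) (x + dirX i)
      oilLoop fA land n m y x restDirs r.1 r.2.1 (cnt + r.2.2)
    else
      oilLoop fA land n m y x restDirs v cols cnt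
  termination_by fA _ _ _ _ _ dirs _ _ _ => (fA, dirs.length + 1)
end

def solution (land : List (List Int)) : Int :=
  let n : Int := land.length
  let m : Int := (land.getD 0 []).length
  let visited : List (List Bool) := List.replicate n.toNat (List.replicate m.toNat false)
  let ans : List Int := List.replicate m.toNat 0
  let st :=
    (PySem.List.pyRange 0 n 1).foldl (fun st i =>
      (PySem.List.pyRange 0 m 1).foldl (fun st j =>
        if getL land i j = 1 ∧ getV st.1 i j = false then
          let r := oilCnt (n.toNat * m.toNat + 1) land n m st.1 PySem.Set.empty i j
          -- for c in cols: ans[c] += size   (every c satisfies 0 ≤ c < m: it was an x-guard-checked column)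
          (r.1, r.2.1.foldl (fun a c => a.set c.toNat (a.getD c.toNat 0 + r.2.2)) st.2)
        else st) st) (visited, ans)
  (PySem.List.max? st.2 (fun z => z)).getD 0

-- ===== PORT B =====
-- B's while loop over the explicit stack of frames (y, x, d): d = 0 first touch (mark cell),
-- d ∈ [0,4) try direction d then re-push (y, x, d+1).  State is (visited, cols, size).
-- Fuel is a totality guard only (one unit per pop; never exhausted: a cell is marked at most once).
def runB : Nat → List (List Int) → Int → Int → List (List Bool) × PySem.Set Int × Int →
    List (Int × Int × Int) → List (List Bool) × PySem.Set Int × Int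
  | _, _, _, _, st, [] => st
  | 0, _, _, _, st, _ :: _ => st
  | fB + 1, land, n, m, st, (y, x, d) :: stack =>
    let st1 := if d = 0 then (setV st.1 y x true, PySem.Set.add st.2.1 x, st.2.2 + 1) else st
    if d < 4 then
      if 0 ≤ x + dirX d ∧ x + dirX d < m ∧ 0 ≤ y + dirY d ∧ y + dirY d < n ∧
          getL land (y + dirY d) (x + dirX d) = 1 ∧ getV st1.1 (y + dirY d) (x + dirX d) = false then
        runB fB land n m st1 ((y + dirY d, x + dirX d, 0) :: (y, x, d + 1) :: stack)
      else
        runB fB land n m st1 ((y, x, d + 1) :: stack)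
    else
      runB fB land n m st1 stack

def solution_alt (land : List (List Int)) : Int :=
  let n : Int := land.length
  let m : Int := (land.getD 0 []).length
  let visited : List (List Bool) := List.replicate n.toNat (List.replicate m.toNat false)
  let ans : List Int := List.replicate m.toNat 0
  let st :=
    (PySem.List.pyRange 0 n 1).foldl (fun st i =>
      (PySem.List.pyRange 0 m 1).foldl (fun st j =>
        if getL land i j = 1 ∧ getV st.1 i j = false then
          let r := runB (5 * (n.toNat * m.toNat) + 5) land n m (st.1, PySem.Set.empty, 0) [(i, j, 0)]
          (r.1, r.2.1.foldl (fun a c => a.set c.toNat (a.getD c.toNat 0 + r.2.2)) st.2)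
        else st) st) (visited, ans)
  (PySem.List.max? st.2 (fun z => z)).getD 0

-- ===== PRECONDITION & SPEC =====
-- Pre_ excludes exactly the inputs on which A raises: the empty grid (land[0] → IndexError),
-- an empty first row (max([]) → ValueError), and grids with a later row shorter than the
-- first (the scan land[i][j], j < m, hits it → IndexError).  Rows longer than the first are allowed.
-- (The proved port equality happens to hold even outside Pre_; Pre_ only marks where the Pythons raise.)
def Pre_solution (land : List (List Int)) : Prop :=
  land ≠ [] ∧ 0 < (land.headD []).length ∧ ∀ r ∈ land, (land.headD []).length ≤ r.length
instance (land : List (List Int)) : Decidable (Pre_solution land) := by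
  unfold Pre_solution; infer_instance
def pvWitness_solution : List (List Int) := [[1, 0, 1], [1, 1, 0]]
def Spec_solution (land : List (List Int)) (out : Int) : Prop := out = solution_alt land
instance (land : List (List Int)) (out : Int) : Decidable (Spec_solution land out) := by
  unfold Spec_solution; infer_instance

-- ===== CLAIM =====
def Claim_equal_solution : Prop :=
  ∀ (land : List (List Int)), Dom_solution land → Pre_solution land →
    Spec_solution land (solution land)

-- ===== LEMMAS AND PROOFS =====
def shapeV (N M : Nat) (v : List (List Bool)) : Prop :=
  v.length = N ∧ ∀ r ∈ v, r.length = M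

def fcount (v : List (List Bool)) : Nat := (v.map (fun r => r.count false)).sum

theorem shapeV_setV {N M : Nat} {v : List (List Bool)} {y : Int} (h : shapeV N M v)
    (hy : y.toNat < v.length) (x : Int) (b : Bool) : shapeV N M (setV v y x b) := by
  refine ⟨by simpa [setV] using h.1, ?_⟩
  intro r hr
  rcases List.mem_or_eq_of_mem_set hr with h' | h'
  · exact h.2 r h'
  · subst h'
    rw [List.length_set, List.getD_eq_getElem _ _ hy]
    exact h.2 _ (List.getElem_mem hy)

theorem count_false_set_true : ∀ (r : List Bool) (i : Nat), i < r.length →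
    r.getD i false = false → (r.set i true).count false + 1 = r.count false := by
  intro r
  induction r with
  | nil => intro i hi; simp at hi
  | cons a t ih =>
    intro i hi hf
    cases i with
    | zero => simp_all
    | succ i =>
      simp only [List.set_cons_succ, List.count_cons]
      have := ih i (by simpa using hi) (by simpa using hf)
      omega

theorem fcount_set : ∀ (v : List (List Bool)) (i : Nat) (r' : List Bool), i < v.length →
    fcount (v.set i r') + (v.getD i []).count false = fcount v + r'.count false := by
  intro v
  induction v with
  | nil => intro i r' hi; simp at hi
  | cons a t ih =>
    intro i r' hi
    cases i with
    | zero => simp [fcount]; omega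
    | succ i =>
      have := ih i r' (by simpa using hi)
      simp only [List.set_cons_succ, List.getD_cons_succ]
      simp [fcount] at this ⊢
      omega

theorem fcount_setV {v : List (List Bool)} {y x : Int}
    (hy : y.toNat < v.length) (hx : x.toNat < (v.getD y.toNat []).length)
    (hf : getV v y x = false) : fcount (setV v y x true) + 1 = fcount v := by
  have h1 := fcount_set v y.toNat ((v.getD y.toNat []).set x.toNat true) hy
  have h2 := count_false_set_true (v.getD y.toNat []) x.toNat hx hf
  unfold setV
  omega

theorem fcount_le {N M : Nat} {v : List (List Bool)} (h : shapeV N M v) :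
    fcount v ≤ N * M := by
  obtain ⟨hl, hr⟩ := h
  subst hl
  induction v with
  | nil => simp [fcount]
  | cons a t ih =>
    have ha : a.count false ≤ M := by
      have := hr a (by simp)
      simpa [this] using List.count_le_length (l := a) (a := false)
    have ht := ih (fun r hrm => hr r (by simp [hrm]))
    simp only [fcount, List.map_cons, List.sum_cons, List.length_cons] at *
    calc a.count false + (t.map (fun r => r.count false)).sum ≤ M + t.length * M := by omega
    _ = (t.length + 1) * M := by ring

theorem runB_step0 {fB : Nat} {land : List (List Int)} {n m : Int} {v : List (List Bool)}
    {cols : PySem.Set Int} {k : Int} {y x : Int} {rest : List (Int × Int × Int)} :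
    runB (fB + 1) land n m (v, cols, k) ((y, x, 0) :: rest) =
      if 0 ≤ x + dirX 0 ∧ x + dirX 0 < m ∧ 0 ≤ y + dirY 0 ∧ y + dirY 0 < n ∧
          getL land (y + dirY 0) (x + dirX 0) = 1 ∧
          getV (setV v y x true) (y + dirY 0) (x + dirX 0) = false then
        runB fB land n m (setV v y x true, PySem.Set.add cols x, k + 1)
          ((y + dirY 0, x + dirX 0, 0) :: (y, x, 0 + 1) :: rest)
      else
        runB fB land n m (setV v y x true, PySem.Set.add cols x, k + 1) ((y, x, 0 + 1) :: rest) := by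
  simp [runB]

theorem runB_stepD {fB : Nat} {land : List (List Int)} {n m : Int} {v : List (List Bool)}
    {cols : PySem.Set Int} {k : Int} {y x : Int} {d : Int} (hd0 : d ≠ 0) (hd4 : d < 4)
    {rest : List (Int × Int × Int)} :
    runB (fB + 1) land n m (v, cols, k) ((y, x, d) :: rest) =
      if 0 ≤ x + dirX d ∧ x + dirX d < m ∧ 0 ≤ y + dirY d ∧ y + dirY d < n ∧
          getL land (y + dirY d) (x + dirX d) = 1 ∧ getV v (y + dirY d) (x + dirX d) = false then
        runB fB land n m (v, cols, k) ((y + dirY d, x + dirX d, 0) :: (y, x, d + 1) :: rest)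
      else
        runB fB land n m (v, cols, k) ((y, x, d + 1) :: rest) := by
  simp [runB, hd0, hd4]

theorem runB_step4 {fB : Nat} {land : List (List Int)} {n m : Int} {v : List (List Bool)}
    {cols : PySem.Set Int} {k : Int} {y x : Int} {d : Int} (hd : ¬ d < 4) (hd0 : d ≠ 0)
    {rest : List (Int × Int × Int)} :
    runB (fB + 1) land n m (v, cols, k) ((y, x, d) :: rest) = runB fB land n m (v, cols, k) rest := by
  simp [runB, hd, hd0]

theorem simMain (land : List (List Int)) (n m : Int) (N M : Nat)
    (hn : n = (N : Int)) (hm : m = (M : Int)) :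
    ∀ (fA : Nat) (v : List (List Bool)) (cols : PySem.Set Int) (y x : Int),
      shapeV N M v → 0 ≤ y → y < n → 0 ≤ x → x < m → getV v y x = false → fcount v < fA →
      shapeV N M (oilCnt fA land n m v cols y x).1 ∧
      fcount (oilCnt fA land n m v cols y x).1 < fcount v ∧
      (oilCnt fA land n m v cols y x).2.2
        = ((fcount v - fcount (oilCnt fA land n m v cols y x).1 : Nat) : Int) ∧
      ∀ (fB : Nat) (k : Int) (rest : List (Int × Int × Int)),
        runB (fB + 5 * (fcount v - fcount (oilCnt fA land n m v cols y x).1)) land n m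
            (v, cols, k) ((y, x, 0) :: rest)
          = runB fB land n m
              ((oilCnt fA land n m v cols y x).1, (oilCnt fA land n m v cols y x).2.1,
               k + (oilCnt fA land n m v cols y x).2.2) rest := by
  intro fA
  induction fA with
  | zero => intro v cols y x _ _ _ _ _ _ hfc; omega
  | succ fA ih =>
    intro v cols y x hs hy0 hyn hx0 hxm hv hfc
    have hyl : y.toNat < v.length := by rw [hs.1]; omega
    have hrowlen : (v.getD y.toNat []).length = M := by
      rw [List.getD_eq_getElem _ _ hyl]; exact hs.2 _ (List.getElem_mem hyl)
    have hxl : x.toNat < (v.getD y.toNat []).length := by rw [hrowlen]; omega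
    have hfc1 : fcount (setV v y x true) + 1 = fcount v := fcount_setV hyl hxl hv
    have hs1 : shapeV N M (setV v y x true) := shapeV_setV hs hyl x true
    have loopSim : ∀ (k4 jj : Nat), jj + k4 = 4 → 1 ≤ jj →
        ∀ (v' : List (List Bool)) (cols' : PySem.Set Int) (cnt : Int),
        shapeV N M v' → fcount v' < fA →
        shapeV N M (oilLoop fA land n m y x (PySem.List.pyRange (jj : Int) 4 1) v' cols' cnt).1 ∧
        fcount (oilLoop fA land n m y x (PySem.List.pyRange (jj : Int) 4 1) v' cols' cnt).1 ≤ fcount v' ∧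
        (oilLoop fA land n m y x (PySem.List.pyRange (jj : Int) 4 1) v' cols' cnt).2.2
          = cnt + ((fcount v' - fcount (oilLoop fA land n m y x (PySem.List.pyRange (jj : Int) 4 1) v' cols' cnt).1 : Nat) : Int) ∧
        ∀ (fB : Nat) (k : Int) (rest : List (Int × Int × Int)),
          runB (fB + (k4 + 1) + 5 * (fcount v' - fcount (oilLoop fA land n m y x (PySem.List.pyRange (jj : Int) 4 1) v' cols' cnt).1)) land n m
              (v', cols', k) ((y, x, (jj : Int)) :: rest)
            = runB fB land n m
                ((oilLoop fA land n m y x (PySem.List.pyRange (jj : Int) 4 1) v' cols' cnt).1,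
                 (oilLoop fA land n m y x (PySem.List.pyRange (jj : Int) 4 1) v' cols' cnt).2.1,
                 k + ((fcount v' - fcount (oilLoop fA land n m y x (PySem.List.pyRange (jj : Int) 4 1) v' cols' cnt).1 : Nat) : Int)) rest := by
      intro k4
      induction k4 with
      | zero =>
        intro jj hsum hj1 v' cols' cnt hs' hfc'
        have hjj : jj = 4 := by omega
        subst hjj
        rw [PySem.List.pyRange_one_eq_nil (by norm_num)]
        simp only [oilLoop]
        refine ⟨hs', le_rfl, by simp, ?_⟩
        intro fB k rest
        have hfu : fB + (0 + 1) + 5 * (fcount v' - fcount v') = fB + 1 := by omega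
        rw [hfu, runB_step4 (by omega) (by omega)]
        simp
      | succ k4 ihk =>
        intro jj hsum hj1 v' cols' cnt hs' hfc'
        have hcons : PySem.List.pyRange (jj : Int) 4 1 = (jj : Int) :: PySem.List.pyRange ((jj : Int) + 1) 4 1 :=
          PySem.List.pyRange_one_cons (by exact_mod_cast (by omega : jj < 4))
        have hcast : ((jj : Int) + 1) = ((jj + 1 : Nat) : Int) := by push_cast; ring
        rw [hcons, hcast]
        simp only [oilLoop]
        by_cases hg : 0 ≤ x + dirX (jj : Int) ∧ x + dirX (jj : Int) < m ∧ 0 ≤ y + dirY (jj : Int) ∧ y + dirY (jj : Int) < n ∧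
            getL land (y + dirY (jj : Int)) (x + dirX (jj : Int)) = 1 ∧ getV v' (y + dirY (jj : Int)) (x + dirX (jj : Int)) = false
        · rw [if_pos hg]
          obtain ⟨hcs, hclt, hccnt, hcrun⟩ :=
            ih v' cols' (y + dirY (jj : Int)) (x + dirX (jj : Int)) hs'
              hg.2.2.1 hg.2.2.2.1 hg.1 hg.2.1 hg.2.2.2.2.2 hfc'
          set rc := oilCnt fA land n m v' cols' (y + dirY (jj : Int)) (x + dirX (jj : Int)) with hrc
          obtain ⟨hRs, hRle, hRcnt, hRrun⟩ :=
            ihk (jj + 1) (by omega) (by omega) rc.1 rc.2.1 (cnt + rc.2.2) hcs (by omega)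
          set R := oilLoop fA land n m y x (PySem.List.pyRange ((jj + 1 : Nat) : Int) 4 1) rc.1 rc.2.1 (cnt + rc.2.2) with hR
          have hble : fcount R.1 ≤ fcount rc.1 := hRle
          refine ⟨hRs, by omega, ?_, ?_⟩
          · rw [hRcnt, hccnt]; omega
          · intro fB k rest
            have hfu : fB + (k4 + 1 + 1) + 5 * (fcount v' - fcount R.1)
                = ((fB + (k4 + 1) + 5 * (fcount rc.1 - fcount R.1)) + 5 * (fcount v' - fcount rc.1)) + 1 := by
              omega
            have hj0 : ((jj : Nat) : Int) ≠ 0 := by omega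
            have hj4 : ((jj : Nat) : Int) < 4 := by omega
            rw [hfu, runB_stepD hj0 hj4, if_pos hg, hcast, hcrun, hRrun,
              show k + rc.2.2 + ((fcount rc.1 - fcount R.1 : Nat) : Int)
                  = k + ((fcount v' - fcount R.1 : Nat) : Int) from by rw [hccnt]; omega]
        · rw [if_neg hg]
          obtain ⟨hRs, hRle, hRcnt, hRrun⟩ :=
            ihk (jj + 1) (by omega) (by omega) v' cols' cnt hs' hfc'
          set R := oilLoop fA land n m y x (PySem.List.pyRange ((jj + 1 : Nat) : Int) 4 1) v' cols' cnt with hR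
          refine ⟨hRs, hRle, hRcnt, ?_⟩
          intro fB k rest
          have hfu : fB + (k4 + 1 + 1) + 5 * (fcount v' - fcount R.1)
              = (fB + (k4 + 1) + 5 * (fcount v' - fcount R.1)) + 1 := by omega
          have hj0 : ((jj : Nat) : Int) ≠ 0 := by omega
          have hj4 : ((jj : Nat) : Int) < 4 := by omega
          rw [hfu, runB_stepD hj0 hj4, if_neg hg, hcast, hRrun]
    simp only [oilCnt]
    rw [show PySem.List.pyRange 0 4 1 = 0 :: PySem.List.pyRange (0 + 1) 4 1 from
      PySem.List.pyRange_one_cons (by norm_num)]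
    rw [show ((0 : Int) + 1) = ((1 : Nat) : Int) from by norm_num]
    simp only [oilLoop]
    by_cases hg : 0 ≤ x + dirX 0 ∧ x + dirX 0 < m ∧ 0 ≤ y + dirY 0 ∧ y + dirY 0 < n ∧
        getL land (y + dirY 0) (x + dirX 0) = 1 ∧
        getV (setV v y x true) (y + dirY 0) (x + dirX 0) = false
    · rw [if_pos hg]
      obtain ⟨hcs, hclt, hccnt, hcrun⟩ :=
        ih (setV v y x true) (PySem.Set.add cols x) (y + dirY 0) (x + dirX 0) hs1
          hg.2.2.1 hg.2.2.2.1 hg.1 hg.2.1 hg.2.2.2.2.2 (by omega)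
      set rc := oilCnt fA land n m (setV v y x true) (PySem.Set.add cols x) (y + dirY 0) (x + dirX 0) with hrc
      obtain ⟨hRs, hRle, hRcnt, hRrun⟩ :=
        loopSim 3 1 (by norm_num) (by norm_num) rc.1 rc.2.1 (1 + rc.2.2) hcs (by omega)
      set R := oilLoop fA land n m y x (PySem.List.pyRange ((1 : Nat) : Int) 4 1) rc.1 rc.2.1 (1 + rc.2.2) with hR
      refine ⟨hRs, by omega, ?_, ?_⟩
      · rw [hRcnt, hccnt]; omega
      · intro fB k rest
        have hfu : fB + 5 * (fcount v - fcount R.1)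
            = ((fB + (3 + 1) + 5 * (fcount rc.1 - fcount R.1))
                + 5 * (fcount (setV v y x true) - fcount rc.1)) + 1 := by omega
        rw [hfu, runB_step0, if_pos hg,
          show ((0 : Int) + 1) = ((1 : Nat) : Int) from by norm_num, hcrun, hRrun,
          show k + 1 + rc.2.2 + ((fcount rc.1 - fcount R.1 : Nat) : Int) = k + R.2.2 from by
            rw [hRcnt, hccnt]; omega]
    · rw [if_neg hg]
      obtain ⟨hRs, hRle, hRcnt, hRrun⟩ :=
        loopSim 3 1 (by norm_num) (by norm_num) (setV v y x true) (PySem.Set.add cols x) 1 hs1 (by omega)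
      set R := oilLoop fA land n m y x (PySem.List.pyRange ((1 : Nat) : Int) 4 1)
        (setV v y x true) (PySem.Set.add cols x) 1 with hR
      refine ⟨hRs, by omega, ?_, ?_⟩
      · rw [hRcnt]; omega
      · intro fB k rest
        have hfu : fB + 5 * (fcount v - fcount R.1)
            = (fB + (3 + 1) + 5 * (fcount (setV v y x true) - fcount R.1)) + 1 := by omega
        rw [hfu, runB_step0, if_neg hg,
          show ((0 : Int) + 1) = ((1 : Nat) : Int) from by norm_num, hRrun,
          show k + 1 + ((fcount (setV v y x true) - fcount R.1 : Nat) : Int) = k + R.2.2 from by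
            rw [hRcnt]; omega]

theorem rowSim (land : List (List Int)) (n m : Int) (N M : Nat)
    (hn : n = (N : Int)) (hm : m = (M : Int)) (fuelA fuelB : Nat)
    (hfA : N * M < fuelA) (hfB : 5 * (N * M) ≤ fuelB) (i : Int) (h0i : 0 ≤ i) (hin : i < n) :
    ∀ (js : List Int), (∀ j ∈ js, 0 ≤ j ∧ j < m) →
    ∀ (st : List (List Bool) × List Int), shapeV N M st.1 →
      js.foldl (fun st j =>
        if getL land i j = 1 ∧ getV st.1 i j = false then
          let r := oilCnt fuelA land n m st.1 PySem.Set.empty i j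
          (r.1, r.2.1.foldl (fun a c => a.set c.toNat (a.getD c.toNat 0 + r.2.2)) st.2)
        else st) st
      = js.foldl (fun st j =>
        if getL land i j = 1 ∧ getV st.1 i j = false then
          let r := runB fuelB land n m (st.1, PySem.Set.empty, 0) [(i, j, 0)]
          (r.1, r.2.1.foldl (fun a c => a.set c.toNat (a.getD c.toNat 0 + r.2.2)) st.2)
        else st) st
      ∧ shapeV N M (js.foldl (fun st j =>
        if getL land i j = 1 ∧ getV st.1 i j = false then
          let r := oilCnt fuelA land n m st.1 PySem.Set.empty i j
          (r.1, r.2.1.foldl (fun a c => a.set c.toNat (a.getD c.toNat 0 + r.2.2)) st.2)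
        else st) st).1 := by
  intro js
  induction js with
  | nil => intro _ st hs; exact ⟨rfl, hs⟩
  | cons j js ihj =>
    intro hb st hs
    have hj := hb j (by simp)
    simp only [List.foldl_cons]
    by_cases hg : getL land i j = 1 ∧ getV st.1 i j = false
    · obtain ⟨hrs, hrlt, hrcnt, hrun⟩ :=
        simMain land n m N M hn hm fuelA st.1 PySem.Set.empty i j hs h0i hin hj.1 hj.2 hg.2
          (by have := fcount_le hs; omega)
      set r := oilCnt fuelA land n m st.1 PySem.Set.empty i j with hr
      have hd : fcount st.1 - fcount r.1 ≤ N * M := by have := fcount_le hs; omega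
      have hBr : runB fuelB land n m (st.1, PySem.Set.empty, 0) [(i, j, 0)]
          = (r.1, r.2.1, 0 + r.2.2) := by
        rw [show fuelB = (fuelB - 5 * (fcount st.1 - fcount r.1))
              + 5 * (fcount st.1 - fcount r.1) from by omega, hrun]
        simp only [runB]
      have hstep :
          (if getL land i j = 1 ∧ getV st.1 i j = false then
            let r := oilCnt fuelA land n m st.1 PySem.Set.empty i j
            (r.1, r.2.1.foldl (fun a c => a.set c.toNat (a.getD c.toNat 0 + r.2.2)) st.2)
          else st)
          = (if getL land i j = 1 ∧ getV st.1 i j = false then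
            let r := runB fuelB land n m (st.1, PySem.Set.empty, 0) [(i, j, 0)]
            (r.1, r.2.1.foldl (fun a c => a.set c.toNat (a.getD c.toNat 0 + r.2.2)) st.2)
          else st) := by
        rw [if_pos hg, if_pos hg]
        simp only [hBr, zero_add, ← hr]
      rw [← hstep]
      exact ihj (fun j' hj' => hb j' (by simp [hj'])) _ (by rw [if_pos hg]; exact hrs)
    · rw [if_neg hg, if_neg hg]
      exact ihj (fun j' hj' => hb j' (by simp [hj'])) st hs

theorem gridSim (land : List (List Int)) (n m : Int) (N M : Nat)
    (hn : n = (N : Int)) (hm : m = (M : Int)) (fuelA fuelB : Nat)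
    (hfA : N * M < fuelA) (hfB : 5 * (N * M) ≤ fuelB) :
    ∀ (is : List Int), (∀ i ∈ is, 0 ≤ i ∧ i < n) →
    ∀ (st : List (List Bool) × List Int), shapeV N M st.1 →
      is.foldl (fun st i => (PySem.List.pyRange 0 m 1).foldl (fun st j =>
        if getL land i j = 1 ∧ getV st.1 i j = false then
          let r := oilCnt fuelA land n m st.1 PySem.Set.empty i j
          (r.1, r.2.1.foldl (fun a c => a.set c.toNat (a.getD c.toNat 0 + r.2.2)) st.2)
        else st) st) st
      = is.foldl (fun st i => (PySem.List.pyRange 0 m 1).foldl (fun st j =>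
        if getL land i j = 1 ∧ getV st.1 i j = false then
          let r := runB fuelB land n m (st.1, PySem.Set.empty, 0) [(i, j, 0)]
          (r.1, r.2.1.foldl (fun a c => a.set c.toNat (a.getD c.toNat 0 + r.2.2)) st.2)
        else st) st) st := by
  intro is
  induction is with
  | nil => intro _ st _; rfl
  | cons i is ihi =>
    intro hb st hs
    have hi := hb i (by simp)
    have hrow := rowSim land n m N M hn hm fuelA fuelB hfA hfB i hi.1 hi.2
      (PySem.List.pyRange 0 m 1)
      (fun j hj => by
        have := (PySem.List.mem_pyRange_one (x := j) (a := 0) (b := m)).1 hj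
        omega) st hs
    simp only [List.foldl_cons]
    rw [← hrow.1]
    exact ihi (fun i' hi' => hb i' (by simp [hi'])) _ hrow.2

-- ===== VERDICT =====
theorem solution_spec : Claim_equal_solution := by
  unfold Claim_equal_solution
  intro land _ _
  unfold Spec_solution
  simp only [solution, solution_alt]
  have h := gridSim land (↑land.length) (↑(land.getD 0 []).length)
      land.length (land.getD 0 []).length rfl rfl
      ((↑land.length : Int).toNat * ((↑(land.getD 0 []).length : Int)).toNat + 1)
      (5 * ((↑land.length : Int).toNat * ((↑(land.getD 0 []).length : Int)).toNat) + 5)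
      (by simp) (by simp)
      (PySem.List.pyRange 0 (↑land.length) 1)
      (fun i hi => by have := (PySem.List.mem_pyRange_one).1 hi; omega)
      (List.replicate (↑land.length : Int).toNat
          (List.replicate ((↑(land.getD 0 []).length : Int)).toNat false),
        List.replicate ((↑(land.getD 0 []).length : Int)).toNat 0)
      ⟨by simp, fun r hr => by simp [List.eq_of_mem_replicate hr]⟩
  rw [h]
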